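-- pv_equiv track=rewrite | github.com/nlwtest2020/AyElSeeMoldo | curriculum-planner/scripts/stage1_parse.py | _merge_orphan_delivery_blocks
-- ===== SOURCE A (Python) =====
-- def _merge_orphan_delivery_blocks(blocks: list[dict]) -> list[dict]:
--     """Merge orphan blocks whose names start with 'Delivery:' or 'Format:' into the previous block."""
--     merged = []
--     for block in blocks:
--         name = block.get("activity_name", "").strip()
--         lower_name = name.lower()
--         is_orphan = (
--             (lower_name.startswith("delivery:") or lower_name.startswith("format:"))
--             and merged
--             and not block.get("time")
--         )
--         if is_orphan:
--             parent = merged[-1]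
--             # The "name" is actually delivery instructions
--             content = name
--             if block.get("delivery_instructions"):
--                 content += " " + block["delivery_instructions"]
--             parent["delivery_instructions"] = (
--                 parent.get("delivery_instructions", "") + " " + content
--             ).strip()
--             if block.get("pacing") and not parent.get("pacing"):
--                 parent["pacing"] = block["pacing"]
--             if block.get("instructor_notes"):
--                 parent["instructor_notes"] = (
--                     parent.get("instructor_notes", "") + " " + block["instructor_notes"]
--                 ).strip()
--         else:
--             merged.append(block)
--     return merged
-- ===== SOURCE B (Python) =====
-- def _merge_orphan_delivery_blocks(blocks: list[dict]) -> list[dict]: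
--     """Two-phase rewrite: group each head block with the run of orphan blocks
--     that follows it, then fold every orphan into its head (mutating the same
--     dict objects, like the original)."""
--
--     def _is_orphan(b):
--         n = b.get("activity_name", "").strip().lower()
--         return (n.startswith("delivery:") or n.startswith("format:")) and not b.get("time")
--
--     # Phase 1: split into (head, orphans) groups by index scanning.
--     groups = []
--     i = 0
--     n = len(blocks)
--     while i < n:
--         head = blocks[i]
--         j = i + 1
--         while j < n and _is_orphan(blocks[j]):
--             j += 1
--         groups.append((head, blocks[i + 1:j]))
--         i = j
--
--     # Phase 2: absorb each orphan into its group's head, in order.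
--     def _absorb(head, orphan):
--         text = orphan.get("activity_name", "").strip()
--         if orphan.get("delivery_instructions"):
--             text += " " + orphan["delivery_instructions"]
--         head["delivery_instructions"] = (
--             head.get("delivery_instructions", "") + " " + text
--         ).strip()
--         if orphan.get("pacing") and not head.get("pacing"):
--             head["pacing"] = orphan["pacing"]
--         if orphan.get("instructor_notes"):
--             head["instructor_notes"] = (
--                 head.get("instructor_notes", "") + " " + orphan["instructor_notes"]
--             ).strip()
--         return head
--
--     out = []
--     for head, orphans in groups:
--         for o in orphans:
--             head = _absorb(head, o)
--         out.append(head)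
--     return out
-- ===== Notes on version B (the rewrite author's own statement) =====
-- stated objective: alternative
-- what changed: Single online pass that mutates the last appended block is replaced by a two-phase algorithm: first split the list into (head, following-orphan-run) groups by index scanning, then fold each orphan run into its head.
import Mathlib
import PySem

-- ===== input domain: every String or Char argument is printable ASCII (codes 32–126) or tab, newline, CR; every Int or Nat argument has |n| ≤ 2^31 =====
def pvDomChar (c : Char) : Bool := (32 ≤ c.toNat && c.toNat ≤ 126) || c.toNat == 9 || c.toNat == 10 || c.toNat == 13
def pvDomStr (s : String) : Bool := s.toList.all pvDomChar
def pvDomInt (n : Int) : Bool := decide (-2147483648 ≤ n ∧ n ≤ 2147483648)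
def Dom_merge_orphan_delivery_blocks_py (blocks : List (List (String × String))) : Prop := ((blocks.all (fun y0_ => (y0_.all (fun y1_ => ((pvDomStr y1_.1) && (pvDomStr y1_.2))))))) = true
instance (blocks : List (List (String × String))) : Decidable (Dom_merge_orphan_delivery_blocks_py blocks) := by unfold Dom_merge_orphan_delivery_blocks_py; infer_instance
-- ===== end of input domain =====

-- B replaces A's single online pass (mutating the last appended block) by a two-phase
-- group-then-fold decomposition; same cost, return-value equivalence only (both Pythons
-- mutate the block dicts in place identically).

-- shared dict-on-assoc-list primitives (emulate Python dict .get(k, "") truthiness and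
-- d[k] = v assignment, which overwrites in place or appends; exact for unique keys,
-- which is all a Python dict can present)
def pvGetD (d : List (String × String)) (k : String) : String :=
  match d with
  | [] => ""
  | (k', v) :: rest => if k' == k then v else pvGetD rest k

def pvSet (d : List (String × String)) (k v : String) : List (String × String) :=
  match d with
  | [] => [(k, v)]
  | (k', v') :: rest => if k' == k then (k, v) :: rest else (k', v') :: pvSet rest k v

-- ===== PORT A =====
-- the body of A's orphan branch (parent := merged[-1])
def pvMergeOrphanA (parent block : List (String × String)) (name : String) :
    List (String × String) :=
  let content := if pvGetD block "delivery_instructions" == "" then name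
                 else name ++ " " ++ pvGetD block "delivery_instructions"
  let parent := pvSet parent "delivery_instructions"
      (PySem.Str.strip (pvGetD parent "delivery_instructions" ++ " " ++ content))
  let parent := if pvGetD block "pacing" != "" && pvGetD parent "pacing" == "" then
                  pvSet parent "pacing" (pvGetD block "pacing")
                else parent
  if pvGetD block "instructor_notes" != "" then
    pvSet parent "instructor_notes"
      (PySem.Str.strip (pvGetD parent "instructor_notes" ++ " " ++ pvGetD block "instructor_notes"))
  else parent

-- A's loop; merged is accumulated reversed so merged[-1] is the head, reversed at the end
def pvGoA (acc : List (List (String × String))) (blocks : List (List (String × String))) :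
    List (List (String × String)) :=
  match blocks with
  | [] => acc.reverse
  | block :: rest =>
    let name := PySem.Str.strip (pvGetD block "activity_name")
    let lowerName := PySem.Str.lower name
    if (PySem.Str.startswith lowerName "delivery:" || PySem.Str.startswith lowerName "format:")
        && !acc.isEmpty && pvGetD block "time" == "" then
      match acc with
      | parent :: tl => pvGoA (pvMergeOrphanA parent block name :: tl) rest
      | [] => pvGoA acc rest      -- unreachable: the guard requires acc nonempty
    else pvGoA (block :: acc) rest

def merge_orphan_delivery_blocks_py (blocks : List (List (String × String))) :
    List (List (String × String)) :=
  pvGoA [] blocks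

-- ===== PORT B =====
def pvIsOrphanB (b : List (String × String)) : Bool :=
  let n := PySem.Str.lower (PySem.Str.strip (pvGetD b "activity_name"))
  (PySem.Str.startswith n "delivery:" || PySem.Str.startswith n "format:")
    && pvGetD b "time" == ""

def pvAbsorbB (head orphan : List (String × String)) : List (String × String) :=
  let text0 := PySem.Str.strip (pvGetD orphan "activity_name")
  let text := if pvGetD orphan "delivery_instructions" == "" then text0
              else text0 ++ " " ++ pvGetD orphan "delivery_instructions"
  let head := pvSet head "delivery_instructions"
      (PySem.Str.strip (pvGetD head "delivery_instructions" ++ " " ++ text))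
  let head := if pvGetD orphan "pacing" != "" && pvGetD head "pacing" == "" then
                pvSet head "pacing" (pvGetD orphan "pacing")
              else head
  if pvGetD orphan "instructor_notes" != "" then
    pvSet head "instructor_notes"
      (PySem.Str.strip (pvGetD head "instructor_notes" ++ " " ++ pvGetD orphan "instructor_notes"))
  else head

-- phase 1: (head, run of following orphan blocks) groups
def pvGroupB : List (List (String × String)) →
    List (List (String × String) × List (List (String × String)))
  | [] => []
  | b :: rest =>
      (b, rest.takeWhile pvIsOrphanB) :: pvGroupB (rest.dropWhile pvIsOrphanB)
  termination_by l => l.length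
  decreasing_by
    simpa using Nat.lt_succ_of_le (List.length_dropWhile_le pvIsOrphanB rest)

def merge_orphan_delivery_blocks_py_alt (blocks : List (List (String × String))) :
    List (List (String × String)) :=
  (pvGroupB blocks).map (fun g => g.2.foldl pvAbsorbB g.1)

-- ===== PRECONDITION & SPEC =====
def Spec_merge_orphan_delivery_blocks_py (blocks : List (List (String × String))) (out : List (List (String × String))) : Prop := out = merge_orphan_delivery_blocks_py_alt blocks
instance (blocks : List (List (String × String))) (out : List (List (String × String))) : Decidable (Spec_merge_orphan_delivery_blocks_py blocks out) := by unfold Spec_merge_orphan_delivery_blocks_py; infer_instance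

-- ===== CLAIM (what is proved, stated in full; the proofs are below) =====
def Claim_equal_merge_orphan_delivery_blocks_py : Prop := ∀ (blocks : List (List (String × String))), Dom_merge_orphan_delivery_blocks_py blocks → Spec_merge_orphan_delivery_blocks_py blocks (merge_orphan_delivery_blocks_py blocks)

-- ===== LEMMAS AND PROOFS =====

-- A's orphan-branch body with the (stripped) name plugged in is exactly B's absorb
theorem mergeA_eq_absorbB (p b : List (String × String)) :
    pvMergeOrphanA p b (PySem.Str.strip (pvGetD b "activity_name")) = pvAbsorbB p b := rfl

-- invariant of A's loop against B's group-then-fold shape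
theorem goA_cons (p : List (String × String)) (tl blocks : List (List (String × String))) :
    pvGoA (p :: tl) blocks =
      tl.reverse ++ ((blocks.takeWhile pvIsOrphanB).foldl pvAbsorbB p)
        :: (pvGroupB (blocks.dropWhile pvIsOrphanB)).map (fun g => g.2.foldl pvAbsorbB g.1) := by
  induction blocks generalizing p tl with
  | nil => simp [pvGoA, pvGroupB]
  | cons b rest ih =>
    by_cases h : pvIsOrphanB b = true
    · have hsw : (PySem.Str.startswith (PySem.Str.lower (PySem.Str.strip (pvGetD b "activity_name"))) "delivery:"
          || PySem.Str.startswith (PySem.Str.lower (PySem.Str.strip (pvGetD b "activity_name"))) "format:") = true ∧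
          (pvGetD b "time" == "") = true := by
        simpa [pvIsOrphanB, Bool.and_eq_true] using h
      simp only [pvGoA, List.isEmpty_cons, Bool.not_false, hsw.1, hsw.2, Bool.and_true,
        if_pos]
      rw [ih (pvMergeOrphanA p b (PySem.Str.strip (pvGetD b "activity_name"))) tl]
      rw [mergeA_eq_absorbB]
      simp [h]
    · have hb : pvIsOrphanB b = false := by simpa using h
      have hg : ((PySem.Str.startswith (PySem.Str.lower (PySem.Str.strip (pvGetD b "activity_name"))) "delivery:"
          || PySem.Str.startswith (PySem.Str.lower (PySem.Str.strip (pvGetD b "activity_name"))) "format:")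
          && !(p :: tl).isEmpty && (pvGetD b "time" == "")) = false := by
        have : ((PySem.Str.startswith (PySem.Str.lower (PySem.Str.strip (pvGetD b "activity_name"))) "delivery:"
            || PySem.Str.startswith (PySem.Str.lower (PySem.Str.strip (pvGetD b "activity_name"))) "format:")
            && (pvGetD b "time" == "")) = false := by
          simpa [pvIsOrphanB] using hb
        cases h1 : (PySem.Str.startswith (PySem.Str.lower (PySem.Str.strip (pvGetD b "activity_name"))) "delivery:"
            || PySem.Str.startswith (PySem.Str.lower (PySem.Str.strip (pvGetD b "activity_name"))) "format:") <;>
          cases h2 : (pvGetD b "time" == "") <;> simp_all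
      simp only [pvGoA, hg, if_neg Bool.false_ne_true]
      rw [ih b (p :: tl)]
      simp [hb, pvGroupB]

-- ===== VERDICT (by name: the statement is the Claim_ definition above) =====
theorem merge_orphan_delivery_blocks_py_spec : Claim_equal_merge_orphan_delivery_blocks_py := by
  intro blocks _
  unfold Spec_merge_orphan_delivery_blocks_py
  cases blocks with
  | nil => simp [merge_orphan_delivery_blocks_py, merge_orphan_delivery_blocks_py_alt, pvGoA, pvGroupB]
  | cons b rest =>
    show pvGoA [] (b :: rest) = _
    simp only [pvGoA, List.isEmpty_nil, Bool.not_true, Bool.and_false, Bool.false_and,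
      if_neg Bool.false_ne_true]
    rw [goA_cons b [] rest]
    simp [merge_orphan_delivery_blocks_py_alt, pvGroupB]
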